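-- pv_equiv track=rewrite | github.com/ryrymags/ticket-monitor | src/browser_probe.py | _section_summary
-- ===== SOURCE A (Python) =====
-- def _section_summary(sections: list[str]) -> str | None:
--     if not sections:
--         return None
--     cleaned = [s for s in sections if s]
--     if not cleaned:
--         return None
--     preview = cleaned[:5]
--     suffix = " ..." if len(cleaned) > 5 else ""
--     return ", ".join(preview) + suffix
-- ===== SOURCE B (Python) =====
-- def _section_summary(sections: list[str]) -> str | None:
--     out = None
--     budget = 5
--     for s in sections:
--         if not s:
--             continue
--         if budget == 0:
--             return out + " ..."
--         out = s if out is None else out + ", " + s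
--         budget -= 1
--     return out
-- ===== Notes on version B (the rewrite author's own statement) =====
-- stated objective: alternative
-- what changed: No filtered list, no slice and no join: a single pass grows the result string itself (None until the first truthy item, then appended with ', ') under a countdown budget, returning early with ' ...' appended when a sixth truthy item is met.
import Mathlib
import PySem

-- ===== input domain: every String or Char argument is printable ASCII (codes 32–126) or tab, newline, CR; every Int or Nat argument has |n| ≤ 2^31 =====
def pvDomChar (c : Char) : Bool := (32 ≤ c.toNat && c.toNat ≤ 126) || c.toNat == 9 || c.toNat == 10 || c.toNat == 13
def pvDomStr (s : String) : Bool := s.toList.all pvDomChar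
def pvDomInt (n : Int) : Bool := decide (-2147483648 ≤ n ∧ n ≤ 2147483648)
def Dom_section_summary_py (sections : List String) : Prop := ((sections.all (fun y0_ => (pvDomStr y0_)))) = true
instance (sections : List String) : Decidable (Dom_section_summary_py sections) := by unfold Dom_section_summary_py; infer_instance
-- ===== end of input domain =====

-- B builds the result string directly in one pass (no filtered list, no slice, no join),
-- appending truthy items under a countdown budget; objective: alternative decomposition.


-- ===== PORT A =====
def section_summary_py (sections : List String) : Option String :=
  if sections = [] then none
  else
    let cleaned := sections.filter (fun s => s ≠ "")
    if cleaned = [] then none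
    else
      let preview := PySem.List.slice cleaned none (some 5)
      let suffix := if cleaned.length > 5 then " ..." else ""
      some (PySem.Str.join ", " preview ++ suffix)

-- ===== PORT B =====
-- Source B's for-loop: `out` is the growing result string (none before the first truthy item),
-- `budget` counts down from 5; on a truthy item with budget 0 it returns early with " ..." appended.
-- (`out.getD ""` in the budget-0 branch: in Python `out` is provably non-None there,
--  since budget drops below 5 only after `out` is set.)
def sumLoop : List String → Option String → Nat → Option String
  | [], out, _ => out
  | s :: rest, out, budget =>
    if s = "" then sumLoop rest out budget
    else if budget = 0 then some (out.getD "" ++ " ...")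
    else sumLoop rest (some (match out with | none => s | some o => o ++ ", " ++ s)) (budget - 1)

def section_summary_py_alt (sections : List String) : Option String :=
  sumLoop sections none 5

-- ===== PRECONDITION & SPEC =====
def Spec_section_summary_py (sections : List String) (out : Option String) : Prop := out = section_summary_py_alt sections
instance (sections : List String) (out : Option String) : Decidable (Spec_section_summary_py sections out) := by unfold Spec_section_summary_py; infer_instance

-- ===== CLAIM =====
def Claim_equal_section_summary_py : Prop := ∀ (sections : List String), Dom_section_summary_py sections → Spec_section_summary_py sections (section_summary_py sections)

-- ===== LEMMAS AND PROOFS =====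

theorem join_cons_cons_str (sep p q : String) (rest : List String) :
    PySem.Str.join sep (p :: q :: rest) = p ++ sep ++ PySem.Str.join sep (q :: rest) := by
  simp [PySem.Str.join, PySem.Chars.join_cons_cons, String.append_assoc]

-- merging the freshly appended item into the head of the joined list
theorem join_push (o s : String) (t : List String) :
    PySem.Str.join ", " ((o ++ ", " ++ s) :: t) = PySem.Str.join ", " (o :: s :: t) := by
  cases t with
  | nil => simp [PySem.Str.join, PySem.Chars.join_singleton, PySem.Chars.join_cons_cons]
  | cons x t' =>
    rw [join_cons_cons_str, join_cons_cons_str, join_cons_cons_str]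
    simp [String.append_assoc]

-- loop invariant after the first truthy item: the loop appends the next truthy items
-- up to `b` of them and flags overflow with " ..."
theorem sumLoop_some (rest : List String) (o : String) (b : Nat) :
    sumLoop rest (some o) b =
      some (PySem.Str.join ", " (o :: (rest.filter (fun s => s ≠ "")).take b)
            ++ (if b < (rest.filter (fun s => s ≠ "")).length then " ..." else "")) := by
  induction rest generalizing o b with
  | nil => simp [sumLoop, PySem.Str.join, PySem.Chars.join_singleton]
  | cons s rest ih =>
    by_cases hs : s = ""
    · simp [sumLoop, hs, ih]
    · rw [sumLoop]
      rw [List.filter_cons_of_pos (by simp [hs])]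
      simp only [if_neg hs]
      cases b with
      | zero =>
        simp [PySem.Str.join, PySem.Chars.join_singleton]
      | succ b' =>
        rw [if_neg (Nat.succ_ne_zero b'), Nat.succ_sub_one, ih, join_push]
        simp only [List.take_succ_cons, List.length_cons, Option.some.injEq]
        congr 2
        simp only [Nat.succ_lt_succ_iff]

-- the loop up to (and excluding) the first truthy item
theorem sumLoop_none (sections : List String) (b : Nat) (hb : b ≠ 0) :
    sumLoop sections none b =
      match sections.filter (fun s => s ≠ "") with
      | [] => none
      | c :: f => some (PySem.Str.join ", " (c :: f.take (b - 1))
                  ++ (if b - 1 < f.length then " ..." else "")) := by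
  induction sections with
  | nil => simp [sumLoop]
  | cons s rest ih =>
    by_cases hs : s = ""
    · simp [sumLoop, hs, ih]
    · rw [sumLoop]
      rw [List.filter_cons_of_pos (by simp [hs])]
      simp only [if_neg hs, if_neg hb]
      exact sumLoop_some rest s (b - 1)

theorem section_summary_py_eq (sections : List String) :
    section_summary_py sections = section_summary_py_alt sections := by
  unfold section_summary_py section_summary_py_alt
  rw [sumLoop_none sections 5 (by norm_num)]
  by_cases hnil : sections = []
  · simp [hnil, List.filter_nil]
  · simp only [if_neg hnil]
    cases hc : sections.filter (fun s => s ≠ "") with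
    | nil => simp
    | cons c f =>
      have hne : sections.filter (fun s => s ≠ "") ≠ [] := by rw [hc]; simp
      have hslice : PySem.List.slice (c :: f) none (some 5) = (c :: f).take 5 := by
        simpa using PySem.List.slice_to_natCast (c :: f) 5
      simp only [hslice, List.cons_ne_nil, List.take_succ_cons,
        List.length_cons, reduceIte]
      norm_num
      by_cases h : 5 ≤ f.length
      · rw [if_pos h, if_pos (by omega)]
      · rw [if_neg h, if_neg (by omega)]

-- ===== VERDICT =====
theorem section_summary_py_spec : Claim_equal_section_summary_py := by
  intro sections _
  exact section_summary_py_eq sections
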